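-- pv_equiv track=rewrite | github.com/Lecrut/Diffusion-code-generation | data/code/38_1_3.py | find_repeated_letters
-- ===== SOURCE A (Python) =====
-- def find_repeated_letters(text):
--     letter_counts = {}
--     for char in text:
--         if 'a' <= char <= 'z':
--             letter = char.lower()
--             letter_counts[letter] = letter_counts.get(letter, 0) + 1
--     repeated_letters = set()
--     for letter, count in letter_counts.items():
--         if count > 1:
--             repeated_letters.add(letter)
--     return repeated_letters
-- ===== SOURCE B (Python) =====
-- def find_repeated_letters(text):
--     return {c for i, c in enumerate(text) if 'a' <= c <= 'z' and c in text[i + 1:]}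
-- ===== Notes on version B (the rewrite author's own statement) =====
-- stated objective: simpler
-- what changed: B keeps no counts at all: instead of A's dict-of-counts plus a second items() pass, it is a single set comprehension that keeps a character iff it is lowercase and occurs again in the remaining suffix of the string (lookahead duplicate detection).
import Mathlib
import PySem

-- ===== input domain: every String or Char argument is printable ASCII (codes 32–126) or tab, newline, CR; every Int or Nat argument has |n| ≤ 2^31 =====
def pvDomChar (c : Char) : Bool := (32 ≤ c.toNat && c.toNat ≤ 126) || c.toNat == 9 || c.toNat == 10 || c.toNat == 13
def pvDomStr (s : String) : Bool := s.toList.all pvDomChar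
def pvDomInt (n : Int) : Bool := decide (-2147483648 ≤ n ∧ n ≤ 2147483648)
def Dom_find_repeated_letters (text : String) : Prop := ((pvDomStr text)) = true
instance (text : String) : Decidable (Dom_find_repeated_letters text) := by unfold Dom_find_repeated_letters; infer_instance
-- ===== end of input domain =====

-- B keeps no counts at all: a single set comprehension keeping each lowercase char that occurs
-- again in the remaining suffix of the string (objective: simpler; not claimed faster).

-- ===== PORT A =====
def find_repeated_letters (text : String) : List String :=
  let letter_counts : PySem.Dict String Int :=
    text.toList.foldl (fun d char =>
      if 'a' ≤ char ∧ char ≤ 'z' then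
        let letter := String.ofList [PySem.Chars.lowerChar char]
        d.insert letter (d.getD letter 0 + 1)
      else d) PySem.Dict.empty
  letter_counts.items.foldl (fun s kv =>
    if kv.2 > 1 then PySem.Set.add s kv.1 else s) PySem.Set.empty

-- ===== PORT B =====
-- 'c in text[i+1:]' is Python substring containment of the one-char string c:
-- ported exactly as PySem.Chars.isIn [c] (PySem.Chars.slice … (i+1) none).
def find_repeated_letters_alt (text : String) : List String :=
  (PySem.List.enumerate text.toList 0).foldl (fun s p =>
    if ('a' ≤ p.2 ∧ p.2 ≤ 'z') ∧ PySem.Chars.isIn [p.2] (PySem.Chars.slice text.toList (some (p.1 + 1)) none) = true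
    then PySem.Set.add s (String.ofList [p.2]) else s) PySem.Set.empty

-- ===== PRECONDITION & SPEC =====
def Spec_find_repeated_letters (text : String) (out : List String) : Prop := out = find_repeated_letters_alt text
instance (text : String) (out : List String) : Decidable (Spec_find_repeated_letters text out) := by unfold Spec_find_repeated_letters; infer_instance

-- ===== CLAIM (what is proved, stated in full; the proofs are below) =====
def Claim_equal_find_repeated_letters : Prop := ∀ (text : String), Dom_find_repeated_letters text → Spec_find_repeated_letters text (find_repeated_letters text)

-- ===== LEMMAS AND PROOFS =====

def pvLow (c : Char) : Bool := decide ('a' ≤ c ∧ c ≤ 'z')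

/-- the chars B's comprehension keeps, computed by recursion on the suffix -/
def pvSel : List Char → List Char
  | [] => []
  | x :: xs => if (pvLow x ∧ x ∈ xs) then x :: pvSel xs else pvSel xs

theorem lowerChar_id_of_lower (c : Char) (h : 'a' ≤ c ∧ c ≤ 'z') :
    PySem.Chars.lowerChar c = c := by
  have hu : PySem.Chars.isupper c = false := by
    unfold PySem.Chars.isupper
    have h2 : ¬ (c ≤ 'Z') := by
      intro hZ
      have h1 := UInt32.le_iff_toNat_le.mp (Char.le_def.mp h.1)
      have h3 := UInt32.le_iff_toNat_le.mp (Char.le_def.mp hZ)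
      have e1 : ('a' : Char).val.toNat = 97 := by decide
      have e2 : ('Z' : Char).val.toNat = 90 := by decide
      omega
    simp [h2]
  unfold PySem.Chars.lowerChar
  rw [hu]
  simp

theorem key_injective : Function.Injective (fun c : Char => String.ofList [c]) := by
  intro a b h
  have := congrArg String.toList h
  simpa using this

theorem foldl_add_if_nodup_fresh (q : String → Prop) [DecidablePred q] :
    ∀ (xs : List String) (s : List String), xs.Nodup → (∀ x ∈ xs, x ∉ s) →
      xs.foldl (fun s k => if q k then PySem.Set.add s k else s) s
        = s ++ xs.filter (fun k => decide (q k)) := by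
  intro xs
  induction xs with
  | nil => intro s _ _; simp
  | cons x xs ih =>
    intro s hnd hf
    simp only [List.foldl_cons, List.filter_cons]
    by_cases hq : q x
    · have hx : x ∉ s := hf x (by simp)
      have hadd : PySem.Set.add s x = s ++ [x] := by
        unfold PySem.Set.add PySem.Set.contains
        simp [List.contains_eq_mem, hx]
      rw [if_pos hq, hadd, ih (s ++ [x]) hnd.of_cons]
      · simp [hq]
      · intro y hy
        simp only [List.mem_append, List.mem_singleton]
        rintro (hys | rfl)
        · exact hf y (by simp [hy]) hys
        · exact (List.nodup_cons.mp hnd).1 hy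
    · rw [if_neg hq, ih s hnd.of_cons (fun y hy => hf y (by simp [hy]))]
      simp [hq]

theorem ofList_map_of_injective {f : Char → String} (hf : Function.Injective f) :
    ∀ (l : List Char), PySem.Set.ofList (l.map f) = (PySem.Set.ofList l).map f := by
  intro l
  induction l with
  | nil => simp [PySem.Set.ofList_nil]
  | cons x xs ih =>
    rw [List.map_cons, PySem.Set.ofList_cons, PySem.Set.ofList_cons, ih]
    unfold PySem.Set.discard
    rw [List.filter_map]
    rw [List.filter_congr (l := PySem.Set.ofList xs)
      (q := fun y => !y == x)
      (by intro a _; simp [Function.comp, hf.eq_iff])]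
    simp

/-- A's result in char form: distinct lowercase letters with count > 1, first-occurrence order. -/
theorem portA_char_form (text : String) :
    find_repeated_letters text
      = ((PySem.Set.ofList (text.toList.filter pvLow)).filter
          (fun c => decide (1 < (text.toList.filter pvLow).count c))).map
          (fun c : Char => String.ofList [c]) := by
  simp only [find_repeated_letters]
  have h1 : text.toList.foldl (fun d char =>
      if 'a' ≤ char ∧ char ≤ 'z' then
        let letter := String.ofList [PySem.Chars.lowerChar char]
        d.insert letter (d.getD letter 0 + 1)
      else (d : PySem.Dict String Int)) PySem.Dict.empty
      = (text.toList.filter (fun c => decide ('a' ≤ c ∧ c ≤ 'z'))).foldl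
          (fun d c => d.insert (String.ofList [c]) (d.getD (String.ofList [c]) 0 + 1))
          PySem.Dict.empty := by
    rw [List.foldl_filter]
    apply PySem.List.foldl_congr_mem
    intro acc x _
    by_cases hx : 'a' ≤ x ∧ x ≤ 'z'
    · rw [if_pos hx, if_pos (by simp [hx])]
      simp only [lowerChar_id_of_lower x hx]
    · rw [if_neg hx, if_neg (by simp [hx])]
  have h1b : (text.toList.filter (fun c => decide ('a' ≤ c ∧ c ≤ 'z'))).foldl
          (fun d c => d.insert (String.ofList [c]) (d.getD (String.ofList [c]) 0 + 1))
          (PySem.Dict.empty : PySem.Dict String Int)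
      = ((text.toList.filter (fun c => decide ('a' ≤ c ∧ c ≤ 'z'))).map
          (fun c : Char => String.ofList [c])).foldl
          (fun d x => d.insert x (d.getD x 0 + 1)) (PySem.Dict.empty : PySem.Dict String Int) :=
    (List.foldl_map (f := fun c : Char => String.ofList [c])
      (g := fun (d : PySem.Dict String Int) (x : String) => d.insert x (d.getD x 0 + 1))
      (l := text.toList.filter (fun c => decide ('a' ≤ c ∧ c ≤ 'z')))
      (init := (PySem.Dict.empty : PySem.Dict String Int))).symm
  rw [h1, h1b, PySem.Dict.foldl_insert_getD_add_one_eq_counter, PySem.Dict.items_counter,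
      List.foldl_map,
      PySem.List.foldl_congr_mem
        (PySem.Set.ofList ((text.toList.filter (fun c => decide ('a' ≤ c ∧ c ≤ 'z'))).map (fun c : Char => String.ofList [c])))
        _
        (fun s k => if (1:Int) < (List.count k ((text.toList.filter (fun c => decide ('a' ≤ c ∧ c ≤ 'z'))).map (fun c : Char => String.ofList [c])) : Int) then PySem.Set.add s k else s)
        PySem.Set.empty
        (by intro acc x _; simp [gt_iff_lt]),
      foldl_add_if_nodup_fresh
        (fun k => (1 : Int) < (List.count k ((text.toList.filter (fun c => decide ('a' ≤ c ∧ c ≤ 'z'))).map (fun c : Char => String.ofList [c])) : Int))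
        (PySem.Set.ofList ((text.toList.filter (fun c => decide ('a' ≤ c ∧ c ≤ 'z'))).map (fun c : Char => String.ofList [c])))
        PySem.Set.empty (PySem.Set.nodup_ofList _) (by intro x _hx hmem; simp [PySem.Set.empty] at hmem)]
  show PySem.Set.empty ++ _ = _
  rw [show (PySem.Set.empty : List String) = [] from rfl, List.nil_append]
  rw [ofList_map_of_injective key_injective, List.filter_map,
      List.filter_congr (l := PySem.Set.ofList (text.toList.filter (fun c => decide ('a' ≤ c ∧ c ≤ 'z'))))
        (q := fun c => decide (1 < (text.toList.filter (fun c => decide ('a' ≤ c ∧ c ≤ 'z'))).count c))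
        (by
          intro a _
          simp only [Function.comp]
          rw [List.count_map_of_injective _ (fun c : Char => String.ofList [c]) key_injective a]
          simp only [decide_eq_decide]
          omega)]
  rfl

/-- B's filtered enumerate, rewritten as structural recursion on the suffix -/
theorem sel_gen : ∀ (l : List Char) (full : List Char) (n : Nat), List.drop n full = l →
    ((PySem.List.enumerate l (n : Int)).filter (fun p =>
        decide (('a' ≤ p.2 ∧ p.2 ≤ 'z') ∧ PySem.Chars.isIn [p.2] (PySem.Chars.slice full (some (p.1 + 1)) none) = true))).map
      (fun p => p.2) = pvSel l := by
  intro l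
  induction l with
  | nil => intro full n h; simp [PySem.List.enumerate_nil, pvSel]
  | cons x xs ih =>
    intro full n h
    have hdrop : List.drop (n + 1) full = xs := by
      have h1 : List.drop 1 (List.drop n full) = xs := by rw [h]; rfl
      rw [List.drop_drop] at h1
      exact h1
    have hcast : ((n : Int) + 1) = ((n + 1 : Nat) : Int) := by push_cast; ring
    have hslice : PySem.Chars.slice full (some ((n : Int) + 1)) none = xs := by
      rw [hcast, PySem.Chars.slice_eq_listSlice, PySem.List.slice_from_natCast, hdrop]
    have hih := ih full (n + 1) hdrop
    rw [← hcast] at hih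
    rw [PySem.List.enumerate_cons, List.filter_cons]
    by_cases hc : ('a' ≤ x ∧ x ≤ 'z') ∧ x ∈ xs
    · have hd : decide (('a' ≤ x ∧ x ≤ 'z') ∧ PySem.Chars.isIn [x] (PySem.Chars.slice full (some ((n:Int) + 1)) none) = true) = true := by
        simp only [hslice, decide_eq_true_eq]
        exact ⟨hc.1, (PySem.Chars.isIn_iff_infix [x] xs).mpr ((List.singleton_infix_iff x xs).mpr hc.2)⟩
      rw [hd]
      simp only [if_true, List.map_cons, hih]
      rw [pvSel]
      rw [if_pos (by exact ⟨by simpa [pvLow] using hc.1, hc.2⟩)]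
    · have hd : decide (('a' ≤ x ∧ x ≤ 'z') ∧ PySem.Chars.isIn [x] (PySem.Chars.slice full (some ((n:Int) + 1)) none) = true) = false := by
        simp only [hslice, decide_eq_false_iff_not]
        intro hcc
        exact hc ⟨hcc.1, (List.singleton_infix_iff x xs).mp ((PySem.Chars.isIn_iff_infix [x] xs).mp hcc.2)⟩
      rw [hd]
      simp only [Bool.false_eq_true, if_false, hih]
      rw [pvSel, if_neg (by rintro ⟨h1, h2⟩; exact hc ⟨by simpa [pvLow] using h1, h2⟩)]

/-- B's result in char form: pvSel, dedupped in order -/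
theorem portB_char_form (text : String) :
    find_repeated_letters_alt text
      = (PySem.Set.ofList (pvSel text.toList)).map (fun c : Char => String.ofList [c]) := by
  unfold find_repeated_letters_alt
  have hfun : (fun (s : List String) (p : Int × Char) =>
      if ('a' ≤ p.2 ∧ p.2 ≤ 'z') ∧ PySem.Chars.isIn [p.2] (PySem.Chars.slice text.toList (some (p.1 + 1)) none) = true
      then PySem.Set.add s (String.ofList [p.2]) else s)
    = (fun s p =>
      if (fun (q : Int × Char) => decide (('a' ≤ q.2 ∧ q.2 ≤ 'z') ∧ PySem.Chars.isIn [q.2] (PySem.Chars.slice text.toList (some (q.1 + 1)) none) = true)) p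
      then (fun (s : List String) (q : Int × Char) => PySem.Set.add s (String.ofList [q.2])) s p else s) := by
    funext s p
    simp
  rw [hfun, ← List.foldl_filter, ← List.foldl_map (f := fun (q : Int × Char) => q.2)
        (g := fun (s : List String) (c : Char) => PySem.Set.add s (String.ofList [c])),
      ← List.foldl_map (f := fun c : Char => String.ofList [c]) (g := PySem.Set.add),
      show (PySem.Set.empty : List String) = [] from rfl, ← PySem.Set.ofList_eq_foldl]
  rw [ofList_map_of_injective (by intro a b hab; simpa using congrArg String.toList hab)]
  congr 1
  have h0 : PySem.List.enumerate text.toList (0 : Int) = PySem.List.enumerate text.toList ((0 : Nat) : Int) := by norm_num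
  rw [h0, sel_gen text.toList text.toList 0 rfl]

theorem filter_discard (P : Char → Bool) (s : List Char) (x : Char) :
    (PySem.Set.discard s x).filter P = PySem.Set.discard (s.filter P) x := by
  unfold PySem.Set.discard
  rw [List.filter_comm]

theorem discard_of_not_mem (s : List Char) (x : Char) (hx : x ∉ s) :
    PySem.Set.discard s x = s := by
  unfold PySem.Set.discard
  apply List.filter_eq_self.mpr
  intro a ha
  simp only [Bool.not_eq_eq_eq_not, Bool.not_true, beq_eq_false_iff_ne]
  exact fun h => hx (h ▸ ha)

theorem mem_ofList_mem (x : Char) (l : List Char) (h : x ∈ PySem.Set.ofList l) : x ∈ l :=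
  (PySem.Set.mem_ofList l x).mp h

/-- the core: lookahead duplicate selection = count-based selection, as ordered sets -/
theorem core_char (l : List Char) :
    PySem.Set.ofList (pvSel l)
      = (PySem.Set.ofList (l.filter pvLow)).filter
          (fun c => decide (1 < (l.filter pvLow).count c)) := by
  induction l with
  | nil => rfl
  | cons x xs ih =>
    by_cases hx : pvLow x = true
    · rw [List.filter_cons_of_pos hx, PySem.Set.ofList_cons]
      by_cases hm : x ∈ xs
      · have hmlw : x ∈ xs.filter pvLow := List.mem_filter.mpr ⟨hm, hx⟩
        have hcx : (1 : Nat) < (x :: xs.filter pvLow).count x := by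
          rw [List.count_cons_self]
          have := List.count_pos_iff.mpr hmlw
          omega
        rw [List.filter_cons_of_pos (by simpa using hcx)]
        have hsel : pvSel (x :: xs) = x :: pvSel xs := by
          rw [pvSel, if_pos ⟨hx, hm⟩]
        rw [hsel, PySem.Set.ofList_cons, ih]
        congr 1
        rw [List.filter_congr (l := PySem.Set.discard (PySem.Set.ofList (xs.filter pvLow)) x)
            (q := fun c => decide (1 < (xs.filter pvLow).count c))
            (by
              intro a ha
              have hne : a ≠ x := ((PySem.Set.mem_discard _ _ _).mp ha).2
              simp only [decide_eq_decide]
              rw [List.count_cons_of_ne hne.symm]),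
          filter_discard]
      · have hnlw : x ∉ xs.filter pvLow := fun h => hm (List.mem_filter.mp h).1
        have hcx : ¬ ((1 : Nat) < (x :: xs.filter pvLow).count x) := by
          rw [List.count_cons_self]
          have := List.count_eq_zero.mpr hnlw
          omega
        rw [List.filter_cons_of_neg (by simpa using hcx)]
        have hsel : pvSel (x :: xs) = pvSel xs := by
          rw [pvSel, if_neg (fun h => hm h.2)]
        rw [hsel, ih, discard_of_not_mem _ _ (fun h => hnlw (mem_ofList_mem _ _ h))]
        apply List.filter_congr
        intro a ha
        have hne : a ≠ x := fun h => hnlw (h ▸ mem_ofList_mem _ _ ha)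
        simp only [decide_eq_decide]
        rw [List.count_cons_of_ne hne.symm]
    · have hsel : pvSel (x :: xs) = pvSel xs := by
        rw [pvSel, if_neg (fun h => hx h.1)]
      rw [hsel, List.filter_cons_of_neg (by simpa using hx), ih]

-- ===== VERDICT (by name: the statement is the Claim_ definition above) =====
theorem find_repeated_letters_spec : Claim_equal_find_repeated_letters := by
  intro text _
  unfold Spec_find_repeated_letters
  rw [portA_char_form, portB_char_form, core_char]
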